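-- pv_equiv track=rewrite | github.com/Theo-Hafsaoui/Licence | L2/I43/crypto/vigener.py | sauteMOuton
-- ===== SOURCE A (Python) =====
-- def sauteMOuton(ch,k):#on utulise l'analyse frequentielle de cesare pour finir le reste
--     l=[]
--     for i in range((len(ch)//k)-1):
--         temp=''
--         for j in range((len(ch))//5+1):
--             if((j*k+i)<len(ch)):
--                 temp+=ch[(j)*k+i]
--         l.append(temp)
--     return l
-- ===== SOURCE B (Python) =====
-- def sauteMOuton(ch, k):
--     # each output entry is the stride-k column starting at i, truncated to len(ch)//5+1 chars
--     rows = len(ch) // 5 + 1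
--     return [ch[i::k][:rows] for i in range(len(ch) // k - 1)]
-- ===== Notes on version B (the rewrite author's own statement) =====
-- stated objective: idiomatic
-- what changed: Replaces the hand-written nested index loops (inner loop with a bounds guard building temp char by char) with a list comprehension of extended slices ch[i::k] truncated by a second slice [:rows].
import Mathlib
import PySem

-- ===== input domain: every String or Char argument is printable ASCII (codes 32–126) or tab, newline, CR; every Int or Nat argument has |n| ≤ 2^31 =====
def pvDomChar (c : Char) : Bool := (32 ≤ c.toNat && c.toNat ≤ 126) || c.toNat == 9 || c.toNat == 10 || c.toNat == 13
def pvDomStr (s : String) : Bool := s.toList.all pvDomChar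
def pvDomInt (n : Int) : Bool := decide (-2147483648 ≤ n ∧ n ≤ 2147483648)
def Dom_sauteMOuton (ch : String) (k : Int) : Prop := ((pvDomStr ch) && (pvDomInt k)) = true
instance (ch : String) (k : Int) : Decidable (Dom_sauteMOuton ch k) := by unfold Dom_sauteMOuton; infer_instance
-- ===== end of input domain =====

-- B replaces A's hand-written nested index loops with a comprehension of extended slices ch[i::k][:rows] (idiomatic, same cost).

-- ===== PORT A =====
-- temp += ch[idx]: the `none` (IndexError) branch is unreachable under A's guard idx < len(ch)
def pvPush (s : List Char) (idx : Int) (temp : List Char) : List Char :=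
  match PySem.List.pyGet? s idx with
  | some c => temp ++ [c]
  | none => temp

def sauteMOuton (ch : String) (k : Int) : List String :=
  let s := ch.toList
  let n : Int := (s.length : Int)  -- len(ch)
  (PySem.List.pyRange 0 (PySem.Int.floordiv n k - 1) 1).foldl
    (fun l i =>
      let temp := (PySem.List.pyRange 0 (PySem.Int.floordiv n 5 + 1) 1).foldl
        (fun temp j =>
          if j * k + i < n then
            pvPush s (j * k + i) temp
          else temp) []
      l ++ [String.ofList temp]) []

-- ===== PORT B =====
def sauteMOuton_alt (ch : String) (k : Int) : List String :=
  let s := ch.toList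
  let n : Int := (s.length : Int)  -- len(ch)
  let rows : Int := PySem.Int.floordiv n 5 + 1
  (PySem.List.pyRange 0 (PySem.Int.floordiv n k - 1) 1).map
    (fun i =>
      -- ch[i::k][:rows]; `.getD []` is only for totality: slice? is none only at k = 0, excluded by Pre_
      String.ofList (PySem.List.slice ((PySem.List.slice? s (some i) none k).getD []) none (some rows)))

-- ===== PRECONDITION & SPEC =====
-- Pre_ excludes exactly k = 0, where A raises ZeroDivisionError on len(ch)//k (B raises there too).
def Pre_sauteMOuton (ch : String) (k : Int) : Prop := k ≠ 0
instance (ch : String) (k : Int) : Decidable (Pre_sauteMOuton ch k) := by unfold Pre_sauteMOuton; infer_instance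
def pvWitness_sauteMOuton : String × Int := ("abcdefghij", 2)

def Spec_sauteMOuton (ch : String) (k : Int) (out : List String) : Prop := out = sauteMOuton_alt ch k
instance (ch : String) (k : Int) (out : List String) : Decidable (Spec_sauteMOuton ch k out) := by unfold Spec_sauteMOuton; infer_instance

-- ===== CLAIM (what is proved, stated in full; the proofs are below) =====
def Claim_equal_sauteMOuton : Prop := ∀ (ch : String) (k : Int), Dom_sauteMOuton ch k → Pre_sauteMOuton ch k → Spec_sauteMOuton ch k (sauteMOuton ch k)

-- ===== LEMMAS AND PROOFS =====

-- A's inner guard j*k+i < n holds exactly for the first ceil((n-i)/k) rows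
theorem pv_guard_iff (s : List Char) (k i : Int) (hk : 0 < k)
    (hin : i < (s.length : Int)) (R : Nat) :
    ((R : Int) * k + i < (s.length : Int)) ↔ R < (((s.length : Int) - i + k - 1) / k).toNat := by
  set n : Int := (s.length : Int)
  have hc1 : (1 : Int) ≤ (n - i + k - 1) / k := by
    rw [Int.le_ediv_iff_mul_le hk]; omega
  have h2 : ((R : Int) < (n - i + k - 1) / k) ↔ R < ((n - i + k - 1) / k).toNat := by omega
  rw [← h2]
  constructor
  · intro h
    have : ((R : Int) + 1) ≤ (n - i + k - 1) / k := by
      rw [Int.le_ediv_iff_mul_le hk]; nlinarith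
    omega
  · intro h
    have : ((R : Int) + 1) * k ≤ n - i + k - 1 := by
      rw [← Int.le_ediv_iff_mul_le hk]; omega
    nlinarith

-- A's inner loop over R rows builds exactly the first min R ceil((n-i)/k) characters of column i
theorem pv_innerA (s : List Char) (k i : Int) (hk : 0 < k) (hi : 0 ≤ i)
    (hin : i < (s.length : Int)) (R : Nat) (acc : List Char) :
    (List.range R).foldl
      (fun (temp : List Char) (jN : Nat) =>
        if (jN : Int) * k + i < (s.length : Int) then
          pvPush s ((jN : Int) * k + i) temp
        else temp) acc
    = acc ++ (List.range (min R (((s.length : Int) - i + k - 1) / k).toNat)).map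
        (fun (jN : Nat) => s.getD ((i + k * (jN : Int)).toNat) default) := by
  set n : Int := (s.length : Int) with hn
  set J : Nat := ((n - i + k - 1) / k).toNat with hJ
  induction R generalizing acc with
  | zero => simp
  | succ R ih =>
    rw [List.range_succ, List.foldl_append, ih]
    by_cases h : R < J
    · have hg : (R : Int) * k + i < n := (pv_guard_iff s k i hk hin R).2 h
      have h0 : (0 : Int) ≤ (R : Int) * k + i := by positivity
      have hlt : (R : Int) * k + i < (s.length : Int) := hg
      simp only [List.foldl_cons, List.foldl_nil, if_pos hg, pvPush,
        PySem.List.pyGet?_eq_some_getElem s h0 hlt]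
      have hmin : min (R + 1) J = min R J + 1 := by omega
      have hminR : min R J = R := by omega
      rw [hmin, List.range_succ, List.map_append, hminR]
      have hidx : ((R : Int) * k + i).toNat = (i + k * (R : Int)).toNat := by
        congr 1; ring
      have hb : ((R : Int) * k + i).toNat < s.length := by omega
      have : s[((R : Int) * k + i).toNat] = s.getD ((i + k * (R : Int)).toNat) default := by
        rw [← hidx, List.getD_eq_getElem s default hb]
      rw [this, List.map_singleton, List.append_assoc]
    · have hg : ¬ ((R : Int) * k + i < n) := fun hc => h ((pv_guard_iff s k i hk hin R).1 hc)
      have hmin : min (R + 1) J = min R J := by omega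
      simp only [List.foldl_cons, List.foldl_nil, if_neg hg, hmin]

-- B's extended slice ch[i::k] lists column i in full
theorem pv_sliceB (s : List Char) (k i : Int) (hk : 0 < k) (hi : 0 ≤ i)
    (hin : i < (s.length : Int)) :
    PySem.List.slice? s (some i) none k
    = some ((List.range (((s.length : Int) - i + k - 1) / k).toNat).map
        (fun (jN : Nat) => s.getD ((i + k * (jN : Int)).toNat) default)) := by
  set n : Int := (s.length : Int) with hn
  rw [PySem.List.slice?]
  rw [if_neg (by omega)]
  simp only [PySem.List.sliceIndices]
  rw [if_neg (by omega : ¬ k < 0), if_neg (by omega : ¬ k < 0), if_neg (by omega : ¬ k < 0), if_neg (by omega : ¬ i < 0)]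
  rw [min_eq_left (by omega : i ≤ n)]
  rw [if_pos hk, if_pos hin]
  congr 1
  rw [← List.filterMap_eq_map (f := fun (jN : Nat) => s.getD ((i + k * (jN : Int)).toNat) default)]
  apply List.filterMap_congr
  intro j hj
  have hjJ : j < ((n - i + k - 1) / k).toNat := List.mem_range.1 hj
  have hg : (j : Int) * k + i < n := (pv_guard_iff s k i hk hin j).2 hjJ
  have h0 : (0 : Int) ≤ i + k * (j : Int) := by positivity
  have hb : (i + k * (j : Int)).toNat < s.length := by
    have : i + k * (j : Int) < n := by nlinarith
    omega
  simp only [Function.comp]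
  rw [List.getElem?_eq_getElem hb, List.getD_eq_getElem s default hb]

-- ===== VERDICT (by name: the statement is the Claim_ definition above) =====
theorem sauteMOuton_spec : Claim_equal_sauteMOuton := by
  unfold Claim_equal_sauteMOuton Pre_sauteMOuton Spec_sauteMOuton
  intro ch k _ hk0
  simp only [sauteMOuton, sauteMOuton_alt]
  set s := ch.toList with hs
  set n : Int := (s.length : Int) with hn
  by_cases hm : PySem.Int.floordiv n k - 1 ≤ 0
  · have hemp : PySem.List.pyRange 0 (PySem.Int.floordiv n k - 1) 1 = [] := by
      rw [PySem.List.pyRange_of_pos _ _ (by norm_num)]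
      rw [if_neg (by omega)]
      simp
    rw [hemp]
    simp
  · have hnn : (0 : Int) ≤ n := by positivity
    have hk : 0 < k := by
      by_contra hkle
      have hkn : k < 0 := by omega
      have h1 := PySem.Int.floordiv_mul_add_mod n k
      have h2 := PySem.Int.mod_neg_bounds n hkn
      have hd : 2 ≤ PySem.Int.floordiv n k := by omega
      nlinarith [mul_le_mul_of_nonpos_right hd (le_of_lt hkn)]
    rw [PySem.Int.floordiv_eq_ediv_of_pos hk] at *
    set m : Int := n / k - 1 with hmdef
    have hm' : 0 < m := by omega
    have hr0 : 0 ≤ PySem.Int.floordiv n 5 + 1 := by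
      rw [PySem.Int.floordiv_eq_ediv_of_pos (by norm_num : (0:Int) < 5)]
      have := Int.ediv_nonneg hnn (by norm_num : (0:Int) ≤ 5)
      omega
    set rows : Int := PySem.Int.floordiv n 5 + 1 with hrows
    have hmcast : m = ((m.toNat : Nat) : Int) := by omega
    have hrcast : rows = ((rows.toNat : Nat) : Int) := by omega
    rw [hmcast, PySem.List.pyRange_zero_natCast, List.foldl_map, List.map_map]
    rw [PySem.List.foldl_append_singleton_eq_map, List.nil_append]
    apply List.map_congr_left
    intro iN hiN
    have hiNm : (iN : Int) < m := by
      have := List.mem_range.1 hiN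
      omega
    have hi : (0 : Int) ≤ (iN : Int) := by positivity
    have hin : (iN : Int) < n := by
      have hdle : n / k ≤ n := Int.ediv_le_self k hnn
      omega
    simp only [Function.comp]
    rw [hrcast, PySem.List.pyRange_zero_natCast, List.foldl_map]
    rw [pv_innerA s k (iN : Int) hk hi hin]
    rw [pv_sliceB s k (iN : Int) hk hi hin, Option.getD_some]
    rw [PySem.List.slice_to _ (by positivity : (0:Int) ≤ ((rows.toNat : Nat) : Int))]
    rw [Int.toNat_natCast, ← List.map_take, List.take_range, List.nil_append]
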